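-- pv_equiv track=rewrite | github.com/alexandraback/datacollection | solutions_5639104758808576_0/Python/avocados/standing_ovation.py | process_instance
-- ===== SOURCE A (Python) =====
-- def process_instance(instance):
--     number_of_people_standing = 0
--     number_of_people_to_invite = 0
--
--     for i, number_of_people in enumerate(instance['audience']):
--         if number_of_people == 0:
--             continue
--         if number_of_people_standing < i:
--             number_of_people_to_invite += i - number_of_people_standing
--             number_of_people_standing = i
--         number_of_people_standing += number_of_people
--
--     return number_of_people_to_invite
-- ===== SOURCE B (Python) =====
-- def _prefixes(aud, start):
--     # list of running prefix sums of aud, beginning with start (length len(aud)+1)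
--     if not aud:
--         return [start]
--     return [start] + _prefixes(aud[1:], start + aud[0])
--
--
-- def process_instance(instance):
--     aud = instance['audience']
--     prefixes = _prefixes(aud, 0)
--     deficits = [i - p for i, (n, p) in enumerate(zip(aud, prefixes)) if n != 0]
--     return max([0] + deficits)
-- ===== Notes on version B (the rewrite author's own statement) =====
-- stated objective: alternative
-- what changed: Replaces A's single-pass standing-count state machine with a staged pipeline: build the full prefix-sum list, form the list of deficits i - prefix[i] at nonzero entries by a comprehension over the zipped lists, and take the max of that list seeded with 0.
import Mathlib
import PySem

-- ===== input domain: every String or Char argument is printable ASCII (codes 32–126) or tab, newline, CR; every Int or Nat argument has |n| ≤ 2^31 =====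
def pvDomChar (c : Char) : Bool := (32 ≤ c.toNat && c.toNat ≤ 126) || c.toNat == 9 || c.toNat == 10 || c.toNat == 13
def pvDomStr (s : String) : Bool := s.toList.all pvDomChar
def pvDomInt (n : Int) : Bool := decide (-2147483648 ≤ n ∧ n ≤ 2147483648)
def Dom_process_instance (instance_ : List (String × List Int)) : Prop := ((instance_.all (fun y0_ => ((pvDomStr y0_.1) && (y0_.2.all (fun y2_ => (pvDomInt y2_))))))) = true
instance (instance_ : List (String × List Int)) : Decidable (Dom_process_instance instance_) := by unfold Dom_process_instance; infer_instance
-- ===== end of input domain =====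

-- B replaces A's single-pass standing-count state machine by a staged pipeline: prefix-sum list, deficit list at nonzero entries, max (alternative decomposition, same O(n) cost).


-- ===== PORT A =====
-- loop body of A: state = (number_of_people_standing, number_of_people_to_invite)
def pvStepA (st : Int × Int) (p : Int × Int) : Int × Int :=
  if p.2 = 0 then st
  else
    let st' := if st.1 < p.1 then (p.1, st.2 + (p.1 - st.1)) else st
    (st'.1 + p.2, st'.2)

def process_instance (instance_ : List (String × List Int)) : Int :=
  match instance_.lookup "audience" with
  | none => 0  -- Python raises KeyError here; excluded by Pre_
  | some aud => ((PySem.List.enumerate aud 0).foldl pvStepA (0, 0)).2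

-- ===== PORT B =====
-- recursive helper _prefixes of Source B
def pvPrefixes : List Int → Int → List Int
  | [], start => [start]
  | a :: rest, start => start :: pvPrefixes rest (start + a)

def process_instance_alt (instance_ : List (String × List Int)) : Int :=
  match instance_.lookup "audience" with
  | none => 0  -- Python raises KeyError here; excluded by Pre_
  | some aud =>
    let prefixes := pvPrefixes aud 0
    let deficits := ((PySem.List.enumerate aud 0).zip prefixes).filterMap
      (fun q => if q.1.2 ≠ 0 then some (q.1.1 - q.2) else none)
    -- max([0] + deficits): Python max of the nonempty list 0 :: deficits
    deficits.foldl max 0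

-- ===== PRECONDITION & SPEC =====
-- Pre_ excludes only inputs without an "audience" key, on which A raises KeyError.
def Pre_process_instance (instance_ : List (String × List Int)) : Prop :=
  (instance_.lookup "audience").isSome = true
instance (instance_ : List (String × List Int)) : Decidable (Pre_process_instance instance_) := by unfold Pre_process_instance; infer_instance
def pvWitness_process_instance : (List (String × List Int)) := [("audience", [1, 0, 2])]

def Spec_process_instance (instance_ : List (String × List Int)) (out : Int) : Prop := out = process_instance_alt instance_
instance (instance_ : List (String × List Int)) (out : Int) : Decidable (Spec_process_instance instance_ out) := by unfold Spec_process_instance; infer_instance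

-- ===== CLAIM (what is proved, stated in full; the proofs are below) =====
def Claim_equal_process_instance : Prop := ∀ (instance_ : List (String × List Int)), Dom_process_instance instance_ → Pre_process_instance instance_ → Spec_process_instance instance_ (process_instance instance_)

-- ===== LEMMAS AND PROOFS =====
-- Intermediate fold (proof helper only): state = (prefix, best)
def pvStepB (st : Int × Int) (p : Int × Int) : Int × Int :=
  (st.1 + p.2, if p.2 ≠ 0 then max st.2 (p.1 - st.1) else st.2)

-- Loop invariant: A's state (s, t) corresponds to the intermediate fold's state (s - t, t).
lemma pv_fold_rel (aud : List Int) : ∀ (k s t : Int),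
    ((PySem.List.enumerate aud k).foldl pvStepA (s, t)).2 =
    ((PySem.List.enumerate aud k).foldl pvStepB (s - t, t)).2 := by
  induction aud with
  | nil => intro k s t; simp [PySem.List.enumerate_nil]
  | cons a rest ih =>
    intro k s t
    simp only [PySem.List.enumerate_cons, List.foldl_cons]
    by_cases ha : a = 0
    · simp only [pvStepA, pvStepB, ha]
      simpa using ih (k + 1) s t
    · by_cases hk : s < k
      · have h1 : pvStepA (s, t) (k, a) = (k + a, t + (k - s)) := by
          simp [pvStepA, ha, hk]
        have h2 : pvStepB (s - t, t) (k, a) = (s - t + a, t + (k - s)) := by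
          simp only [pvStepB, ne_eq, ha, not_false_iff, if_true]
          have : max t (k - (s - t)) = t + (k - s) := by omega
          simp [this]
        rw [h1, h2]
        have := ih (k + 1) (k + a) (t + (k - s))
        have heq : k + a - (t + (k - s)) = s - t + a := by ring
        rw [heq] at this
        exact this
      · have h1 : pvStepA (s, t) (k, a) = (s + a, t) := by
          simp [pvStepA, ha, hk]
        have h2 : pvStepB (s - t, t) (k, a) = (s - t + a, t) := by
          simp only [pvStepB, ne_eq, ha, not_false_iff, if_true]
          have : max t (k - (s - t)) = t := by omega
          simp [this]
        rw [h1, h2]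
        have := ih (k + 1) (s + a) t
        have heq : s + a - t = s - t + a := by ring
        rw [heq] at this
        exact this

-- The intermediate fold computes B's staged pipeline.
lemma pv_fold_staged (aud : List Int) : ∀ (k p b : Int),
    ((PySem.List.enumerate aud k).foldl pvStepB (p, b)).2 =
    (((PySem.List.enumerate aud k).zip (pvPrefixes aud p)).filterMap
      (fun q => if q.1.2 ≠ 0 then some (q.1.1 - q.2) else none)).foldl max b := by
  induction aud with
  | nil => intro k p b; simp [PySem.List.enumerate_nil, pvPrefixes]
  | cons a rest ih =>
    intro k p b
    simp only [PySem.List.enumerate_cons, pvPrefixes, List.zip_cons_cons,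
      List.filterMap_cons, List.foldl_cons]
    by_cases ha : a = 0
    · simp only [ha, ne_eq, not_true_eq_false, if_false, pvStepB]
      simpa [ha] using ih (k + 1) (p + a) b
    · simp only [ne_eq, ha, not_false_iff, if_true, pvStepB, List.foldl_cons]
      simpa using ih (k + 1) (p + a) (max b (k - p))

-- ===== VERDICT (by name: the statement is the Claim_ definition above) =====
theorem process_instance_spec : Claim_equal_process_instance := by
  intro instance_ _ _
  unfold Spec_process_instance process_instance process_instance_alt
  cases h : instance_.lookup "audience" with
  | none => rfl
  | some aud =>
    have h1 := pv_fold_rel aud 0 0 0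
    have h2 := pv_fold_staged aud 0 0 0
    simp only [show (0:Int) - 0 = 0 from rfl] at h1
    simpa using h1.trans h2
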